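-- pv_equiv track=rewrite | github.com/nicoceron/co-acc | scripts/collect_ungrd_public_evidence.py | filtered_links
-- ===== SOURCE A (Python) =====
-- def filtered_links(links: list[str]) -> dict[str, list[str]]:
--     grouped = {
--         "monitor_pdfs": [],
--         "ungrd_links": [],
--         "secop_community": [],
--         "contratos_gov": [],
--         "google_drive": [],
--         "other_relevant": [],
--     }
--     for link in links:
--         lowered = link.lower()
--         if "/documentos/ungrd/" in lowered and lowered.endswith(".pdf"):
--             grouped["monitor_pdfs"].append(link)
--         elif "portal.gestiondelriesgo.gov.co" in lowered:
--             grouped["ungrd_links"].append(link)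
--         elif "community.secop.gov.co" in lowered:
--             grouped["secop_community"].append(link)
--         elif "contratos.gov.co" in lowered:
--             grouped["contratos_gov"].append(link)
--         elif "drive.google.com" in lowered or "docs.google.com" in lowered:
--             grouped["google_drive"].append(link)
--         elif any(
--             token in lowered
--             for token in ("secop", "contrato", "carrotanque", "proveed", "ratificacion")
--         ):
--             grouped["other_relevant"].append(link)
--     for key, values in grouped.items():
--         deduped: list[str] = []
--         for value in values:
--             if value not in deduped:
--                 deduped.append(value)
--         grouped[key] = deduped
--     return grouped
-- ===== SOURCE B (Python) =====
-- def filtered_links(links: list[str]) -> dict[str, list[str]]: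
--     rules = [
--         ("monitor_pdfs",
--          lambda low: "/documentos/ungrd/" in low and low.endswith(".pdf")),
--         ("ungrd_links", lambda low: "portal.gestiondelriesgo.gov.co" in low),
--         ("secop_community", lambda low: "community.secop.gov.co" in low),
--         ("contratos_gov", lambda low: "contratos.gov.co" in low),
--         ("google_drive",
--          lambda low: "drive.google.com" in low or "docs.google.com" in low),
--         ("other_relevant",
--          lambda low: any(
--              token in low
--              for token in ("secop", "contrato", "carrotanque", "proveed", "ratificacion")
--          )),
--     ]
--     remaining = [(link, link.lower()) for link in links]
--     grouped: dict[str, list[str]] = {}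
--     for key, pred in rules:
--         grouped[key] = list(dict.fromkeys(
--             link for link, low in remaining if pred(low)))
--         remaining = [(link, low) for link, low in remaining if not pred(low)]
--     return grouped
-- ===== Notes on version B (the rewrite author's own statement) =====
-- stated objective: alternative
-- what changed: B replaces A's single dispatch loop (if/elif chain appending into six buckets) plus six quadratic per-group dedup loops by a sieve: a data-driven (key, predicate) rule table is applied in six successive filter passes over a shrinking remainder list of (link, lowered) pairs, each group's list deduplicated once with dict.fromkeys.
import Mathlib
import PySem

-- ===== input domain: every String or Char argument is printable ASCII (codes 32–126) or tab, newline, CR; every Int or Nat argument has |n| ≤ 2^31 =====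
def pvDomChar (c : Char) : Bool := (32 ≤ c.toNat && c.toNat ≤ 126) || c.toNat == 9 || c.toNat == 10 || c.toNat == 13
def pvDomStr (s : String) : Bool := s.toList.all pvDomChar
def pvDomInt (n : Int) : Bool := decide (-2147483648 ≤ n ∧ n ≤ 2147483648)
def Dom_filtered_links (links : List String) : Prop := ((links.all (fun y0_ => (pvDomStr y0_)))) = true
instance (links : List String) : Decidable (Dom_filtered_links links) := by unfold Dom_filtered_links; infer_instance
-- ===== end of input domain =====

-- B replaces A's dispatch loop + six quadratic per-group dedup loops by a rule-table sieve:
-- six successive filter passes over a shrinking remainder of (link, lowered) pairs, each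
-- group deduplicated once with dict.fromkeys (alternative decomposition).

-- state of A's grouping loop: the six lists of the fixed-key dict, in insertion order
abbrev FLState := List String × List String × List String × List String × List String × List String

-- ===== PORT A =====
-- A's dict has six fixed literal keys, so it is modelled as a 6-tuple of lists; the
-- returned assoc list lists the keys in the dict's insertion order.
-- the loop body: the if/elif chain, appending link to the matching group
def flStepA (g : FLState) (link : String) : FLState :=
  let lowered := PySem.Str.lower link
  if PySem.Str.isIn "/documentos/ungrd/" lowered && PySem.Str.endswith lowered ".pdf" then
    (g.1 ++ [link], g.2.1, g.2.2.1, g.2.2.2.1, g.2.2.2.2.1, g.2.2.2.2.2)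
  else if PySem.Str.isIn "portal.gestiondelriesgo.gov.co" lowered then
    (g.1, g.2.1 ++ [link], g.2.2.1, g.2.2.2.1, g.2.2.2.2.1, g.2.2.2.2.2)
  else if PySem.Str.isIn "community.secop.gov.co" lowered then
    (g.1, g.2.1, g.2.2.1 ++ [link], g.2.2.2.1, g.2.2.2.2.1, g.2.2.2.2.2)
  else if PySem.Str.isIn "contratos.gov.co" lowered then
    (g.1, g.2.1, g.2.2.1, g.2.2.2.1 ++ [link], g.2.2.2.2.1, g.2.2.2.2.2)
  else if PySem.Str.isIn "drive.google.com" lowered || PySem.Str.isIn "docs.google.com" lowered then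
    (g.1, g.2.1, g.2.2.1, g.2.2.2.1, g.2.2.2.2.1 ++ [link], g.2.2.2.2.2)
  else if (["secop", "contrato", "carrotanque", "proveed", "ratificacion"].any
      (fun token => PySem.Str.isIn token lowered)) then
    (g.1, g.2.1, g.2.2.1, g.2.2.2.1, g.2.2.2.2.1, g.2.2.2.2.2 ++ [link])
  else g

-- A's second loop: per group, 'if value not in deduped: deduped.append(value)'
def flDedupA (values : List String) : List String :=
  values.foldl (fun deduped value =>
    if deduped.contains value then deduped else deduped ++ [value]) []

def filtered_links (links : List String) : List (String × List String) :=
  let g := links.foldl flStepA (([], [], [], [], [], []) : FLState)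
  [("monitor_pdfs", flDedupA g.1), ("ungrd_links", flDedupA g.2.1),
   ("secop_community", flDedupA g.2.2.1), ("contratos_gov", flDedupA g.2.2.2.1),
   ("google_drive", flDedupA g.2.2.2.2.1), ("other_relevant", flDedupA g.2.2.2.2.2)]

-- ===== PORT B =====
-- Source B's rule table: (key, predicate-on-lowered) pairs, in precedence order
def flRules : List (String × (String → Bool)) :=
  [("monitor_pdfs",
    fun low => PySem.Str.isIn "/documentos/ungrd/" low && PySem.Str.endswith low ".pdf"),
   ("ungrd_links", fun low => PySem.Str.isIn "portal.gestiondelriesgo.gov.co" low),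
   ("secop_community", fun low => PySem.Str.isIn "community.secop.gov.co" low),
   ("contratos_gov", fun low => PySem.Str.isIn "contratos.gov.co" low),
   ("google_drive",
    fun low => PySem.Str.isIn "drive.google.com" low || PySem.Str.isIn "docs.google.com" low),
   ("other_relevant",
    fun low => ["secop", "contrato", "carrotanque", "proveed", "ratificacion"].any
      (fun token => PySem.Str.isIn token low))]

-- Source B's 'for key, pred in rules' sieve loop: emit the deduped matches of each rule
-- (dict.fromkeys = PySem.List.dedup) and recurse on the non-matching remainder
def flSieve : List (String × (String → Bool)) → List (String × String) → List (String × List String)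
  | [], _ => []
  | (key, pred) :: rest, remaining =>
      (key, PySem.List.dedup ((remaining.filter (fun p => pred p.2)).map Prod.fst))
        :: flSieve rest (remaining.filter (fun p => !pred p.2))

def filtered_links_alt (links : List String) : List (String × List String) :=
  flSieve flRules (links.map (fun link => (link, PySem.Str.lower link)))

-- ===== PRECONDITION & SPEC =====
def Spec_filtered_links (links : List String) (out : List (String × List String)) : Prop := out = filtered_links_alt links
instance (links : List String) (out : List (String × List String)) : Decidable (Spec_filtered_links links out) := by unfold Spec_filtered_links; infer_instance

-- ===== CLAIM (what is proved, stated in full; the proofs are below) =====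
def Claim_equal_filtered_links : Prop := ∀ (links : List String), Dom_filtered_links links → Spec_filtered_links links (filtered_links links)

-- ===== LEMMAS AND PROOFS =====

-- selector used only by the proofs: index (0..5) of link's group, 6 if none
def flSel (link : String) : Nat :=
  let low := PySem.Str.lower link
  if PySem.Str.isIn "/documentos/ungrd/" low && PySem.Str.endswith low ".pdf" then 0
  else if PySem.Str.isIn "portal.gestiondelriesgo.gov.co" low then 1
  else if PySem.Str.isIn "community.secop.gov.co" low then 2
  else if PySem.Str.isIn "contratos.gov.co" low then 3
  else if PySem.Str.isIn "drive.google.com" low || PySem.Str.isIn "docs.google.com" low then 4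
  else if (["secop", "contrato", "carrotanque", "proveed", "ratificacion"].any
      (fun token => PySem.Str.isIn token low)) then 5
  else 6

-- generic step writing link into component n
def flStepN (n : Nat) (g : FLState) (link : String) : FLState :=
  match n with
  | 0 => (g.1 ++ [link], g.2.1, g.2.2.1, g.2.2.2.1, g.2.2.2.2.1, g.2.2.2.2.2)
  | 1 => (g.1, g.2.1 ++ [link], g.2.2.1, g.2.2.2.1, g.2.2.2.2.1, g.2.2.2.2.2)
  | 2 => (g.1, g.2.1, g.2.2.1 ++ [link], g.2.2.2.1, g.2.2.2.2.1, g.2.2.2.2.2)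
  | 3 => (g.1, g.2.1, g.2.2.1, g.2.2.2.1 ++ [link], g.2.2.2.2.1, g.2.2.2.2.2)
  | 4 => (g.1, g.2.1, g.2.2.1, g.2.2.2.1, g.2.2.2.2.1 ++ [link], g.2.2.2.2.2)
  | 5 => (g.1, g.2.1, g.2.2.1, g.2.2.2.1, g.2.2.2.2.1, g.2.2.2.2.2 ++ [link])
  | _ => g

lemma stepA_eq_stepN (g : FLState) (link : String) :
    flStepA g link = flStepN (flSel link) g link := by
  simp only [flStepA, flSel, flStepN]
  split_ifs <;> rfl

def flP (i : Nat) (l : String) : Bool := flSel l == i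

lemma foldN_eq_filter (links : List String) : ∀ (g : FLState),
    links.foldl (fun g x => flStepN (flSel x) g x) g =
      (g.1 ++ links.filter (flP 0), g.2.1 ++ links.filter (flP 1),
       g.2.2.1 ++ links.filter (flP 2), g.2.2.2.1 ++ links.filter (flP 3),
       g.2.2.2.2.1 ++ links.filter (flP 4), g.2.2.2.2.2 ++ links.filter (flP 5)) := by
  induction links with
  | nil => intro g; simp
  | cons x xs ih =>
    intro g
    simp only [List.foldl_cons, ih, List.filter_cons]
    rcases h : flSel x with _ | _ | _ | _ | _ | _ | n <;>
      simp [flStepN, flP, h, List.append_assoc]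

lemma flDedupA_eq_dedup (values : List String) :
    flDedupA values = PySem.List.dedup values := by
  rw [PySem.List.dedup_eq_ofList, PySem.Set.ofList_eq_foldl]
  unfold flDedupA
  congr 1

-- proof-side mirror of flSieve that filters the links directly (no pair list)
def flSieveL : List (String × (String → Bool)) → List String → List (String × List String)
  | [], _ => []
  | (key, pred) :: rest, xs =>
      (key, PySem.List.dedup (xs.filter (fun l => pred (PySem.Str.lower l))))
        :: flSieveL rest (xs.filter (fun l => !pred (PySem.Str.lower l)))

lemma flSieve_eq_sieveL (rules : List (String × (String → Bool))) :
    ∀ (xs : List String),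
      flSieve rules (xs.map (fun l => (l, PySem.Str.lower l))) = flSieveL rules xs := by
  induction rules with
  | nil => intro xs; rfl
  | cons r rest ih =>
    intro xs
    obtain ⟨key, pred⟩ := r
    simp only [flSieve, flSieveL, List.filter_map, List.map_map, ih, Function.comp_def,
      List.map_id']

-- ===== VERDICT (by name: the statement is the Claim_ definition above) =====
theorem filtered_links_spec : Claim_equal_filtered_links := by
  intro links _
  unfold Spec_filtered_links filtered_links filtered_links_alt
  have hA : links.foldl flStepA (([], [], [], [], [], []) : FLState) =
      links.foldl (fun g x => flStepN (flSel x) g x) (([], [], [], [], [], []) : FLState) :=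
    PySem.List.foldl_congr_mem _ _ _ _ (fun g x _ => stepA_eq_stepN g x)
  rw [flSieve_eq_sieveL]
  simp only [hA, foldN_eq_filter, flDedupA_eq_dedup, List.nil_append]
  simp only [flRules, flSieveL, List.filter_filter]
  have e0 : List.filter (flP 0) links = List.filter (fun x => PySem.Str.isIn "/documentos/ungrd/" (PySem.Str.lower x) && PySem.Str.endswith (PySem.Str.lower x) ".pdf") links :=
    List.filter_congr (fun x _ => by simp only [flP, flSel]; split_ifs <;> simp_all)
  have e1 : List.filter (flP 1) links = List.filter (fun x => PySem.Str.isIn "portal.gestiondelriesgo.gov.co" (PySem.Str.lower x) && !(PySem.Str.isIn "/documentos/ungrd/" (PySem.Str.lower x) && PySem.Str.endswith (PySem.Str.lower x) ".pdf")) links :=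
    List.filter_congr (fun x _ => by simp only [flP, flSel]; split_ifs <;> simp_all <;> by_cases hc : PySem.Chars.endswith (PySem.Chars.lower x.toList) ['.', 'p', 'd', 'f'] = true <;> simp_all)
  have e2 : List.filter (flP 2) links = List.filter (fun x => PySem.Str.isIn "community.secop.gov.co" (PySem.Str.lower x) && (!PySem.Str.isIn "portal.gestiondelriesgo.gov.co" (PySem.Str.lower x) && (!(PySem.Str.isIn "/documentos/ungrd/" (PySem.Str.lower x) && PySem.Str.endswith (PySem.Str.lower x) ".pdf")))) links :=
    List.filter_congr (fun x _ => by simp only [flP, flSel]; split_ifs <;> simp_all <;> by_cases hc : PySem.Chars.endswith (PySem.Chars.lower x.toList) ['.', 'p', 'd', 'f'] = true <;> simp_all)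
  have e3 : List.filter (flP 3) links = List.filter (fun x => PySem.Str.isIn "contratos.gov.co" (PySem.Str.lower x) && (!PySem.Str.isIn "community.secop.gov.co" (PySem.Str.lower x) && (!PySem.Str.isIn "portal.gestiondelriesgo.gov.co" (PySem.Str.lower x) && (!(PySem.Str.isIn "/documentos/ungrd/" (PySem.Str.lower x) && PySem.Str.endswith (PySem.Str.lower x) ".pdf"))))) links :=
    List.filter_congr (fun x _ => by simp only [flP, flSel]; split_ifs <;> simp_all <;> by_cases hc : PySem.Chars.endswith (PySem.Chars.lower x.toList) ['.', 'p', 'd', 'f'] = true <;> simp_all)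
  have e4 : List.filter (flP 4) links = List.filter (fun x => (PySem.Str.isIn "drive.google.com" (PySem.Str.lower x) || PySem.Str.isIn "docs.google.com" (PySem.Str.lower x)) && (!PySem.Str.isIn "contratos.gov.co" (PySem.Str.lower x) && (!PySem.Str.isIn "community.secop.gov.co" (PySem.Str.lower x) && (!PySem.Str.isIn "portal.gestiondelriesgo.gov.co" (PySem.Str.lower x) && (!(PySem.Str.isIn "/documentos/ungrd/" (PySem.Str.lower x) && PySem.Str.endswith (PySem.Str.lower x) ".pdf")))))) links :=
    List.filter_congr (fun x _ => by simp only [flP, flSel]; split_ifs <;> simp_all <;> by_cases hc : PySem.Chars.endswith (PySem.Chars.lower x.toList) ['.', 'p', 'd', 'f'] = true <;> simp_all)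
  have e5 : List.filter (flP 5) links = List.filter (fun x => (["secop", "contrato", "carrotanque", "proveed", "ratificacion"].any fun token => PySem.Str.isIn token (PySem.Str.lower x)) && (!(PySem.Str.isIn "drive.google.com" (PySem.Str.lower x) || PySem.Str.isIn "docs.google.com" (PySem.Str.lower x)) && (!PySem.Str.isIn "contratos.gov.co" (PySem.Str.lower x) && (!PySem.Str.isIn "community.secop.gov.co" (PySem.Str.lower x) && (!PySem.Str.isIn "portal.gestiondelriesgo.gov.co" (PySem.Str.lower x) && (!(PySem.Str.isIn "/documentos/ungrd/" (PySem.Str.lower x) && PySem.Str.endswith (PySem.Str.lower x) ".pdf"))))))) links :=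
    List.filter_congr (fun x _ => by simp only [flP, flSel]; split_ifs <;> simp_all <;> by_cases hc : PySem.Chars.endswith (PySem.Chars.lower x.toList) ['.', 'p', 'd', 'f'] = true <;> simp_all <;> by_cases hd : PySem.Chars.isIn ['d', 'o', 'c', 's', '.', 'g', 'o', 'o', 'g', 'l', 'e', '.', 'c', 'o', 'm'] (PySem.Chars.lower x.toList) = true <;> simp_all)
  rw [e0, e1, e2, e3, e4, e5]
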